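-- pv_equiv track=rewrite | github.com/lebahoang/cp | leetcode/old/1125.py | get_acquired_skills
-- ===== SOURCE A (Python) =====
-- def get_acquired_skills(pskills, s):
--     rs = []
--     for i,v in enumerate(s):
--         if v == '1':
--             for _, j in pskills:
--                 if j == i:
--                     rs.append(i)
--                     break
--     return rs
-- ===== SOURCE B (Python) =====
-- def get_acquired_skills(pskills, s):
--     acquired = {j for _, j in pskills if 0 <= j < len(s) and s[j] == '1'}
--     return sorted(acquired)
-- ===== Notes on version B (the rewrite author's own statement) =====
-- stated objective: faster
-- what changed: Instead of scanning every position of s and rescanning pskills for each '1' bit, B makes one pass over pskills collecting into a set the valid indices j with s[j]=='1', then sorts the set; the nested position-scan with break disappears.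
import Mathlib
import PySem

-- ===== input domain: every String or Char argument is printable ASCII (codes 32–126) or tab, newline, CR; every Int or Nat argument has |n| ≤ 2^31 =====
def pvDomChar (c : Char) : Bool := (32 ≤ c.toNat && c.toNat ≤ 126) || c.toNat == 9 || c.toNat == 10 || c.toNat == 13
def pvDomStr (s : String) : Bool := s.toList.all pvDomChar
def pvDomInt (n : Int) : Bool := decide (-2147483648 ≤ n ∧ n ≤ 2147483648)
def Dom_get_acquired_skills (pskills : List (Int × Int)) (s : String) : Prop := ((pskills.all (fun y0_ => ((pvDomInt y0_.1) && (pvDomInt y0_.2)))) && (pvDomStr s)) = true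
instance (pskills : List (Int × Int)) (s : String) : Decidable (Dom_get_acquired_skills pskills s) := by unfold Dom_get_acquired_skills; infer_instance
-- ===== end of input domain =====

-- B replaces A's scan of every position of s (with an inner rescan of pskills per '1' bit)
-- by one pass over pskills building a set of the contributing indices, then sorting it.

-- ===== PORT A =====
-- inner 'for _, j in pskills: if j == i: rs.append(i); break'
def pvInnerA (rs : List Int) (i : Int) : List (Int × Int) → List Int
  | [] => rs
  | (_, j) :: rest => if j == i then rs ++ [i] else pvInnerA rs i rest

def get_acquired_skills (pskills : List (Int × Int)) (s : String) : List Int :=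
  (PySem.List.enumerate s.toList).foldl
    (fun rs p => if p.2 == '1' then pvInnerA rs p.1 pskills else rs) []

-- ===== PORT B =====
def get_acquired_skills_alt (pskills : List (Int × Int)) (s : String) : List Int :=
  let acquired : PySem.Set Int :=
    PySem.Set.ofList ((pskills.filter (fun p =>
      decide (0 ≤ p.2 ∧ p.2 < (s.toList.length : Int)) &&
      (PySem.List.pyGet? s.toList p.2 == some '1'))).map (·.2))
  PySem.List.sorted acquired (fun x => x) false

-- ===== PRECONDITION & SPEC =====
def Spec_get_acquired_skills (pskills : List (Int × Int)) (s : String) (out : List Int) : Prop := out = get_acquired_skills_alt pskills s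
instance (pskills : List (Int × Int)) (s : String) (out : List Int) : Decidable (Spec_get_acquired_skills pskills s out) := by unfold Spec_get_acquired_skills; infer_instance

-- ===== CLAIM (what is proved, stated in full; the proofs are below) =====
def Claim_equal_get_acquired_skills : Prop := ∀ (pskills : List (Int × Int)) (s : String), Dom_get_acquired_skills pskills s → Spec_get_acquired_skills pskills s (get_acquired_skills pskills s)

-- ===== LEMMAS AND PROOFS =====

-- the inner loop appends i iff some pair's second component equals i
theorem pvInnerA_eq (rs : List Int) (i : Int) (ps : List (Int × Int)) :
    pvInnerA rs i ps = if ps.any (fun p => p.2 == i) then rs ++ [i] else rs := by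
  induction ps with
  | nil => simp [pvInnerA]
  | cons p rest ih =>
    obtain ⟨a, j⟩ := p
    by_cases h : j = i
    · simp [pvInnerA, h]
    · simp only [pvInnerA, ih, List.any_cons,
        show (j == i) = false by simpa using h, Bool.false_or, Bool.false_eq_true, if_false]

-- A's loop as filter-then-map over the enumeration
theorem portA_eq (pskills : List (Int × Int)) (s : String) :
    get_acquired_skills pskills s =
      ((PySem.List.enumerate s.toList).filter
        (fun p => p.2 == '1' && pskills.any (fun q => q.2 == p.1))).map (·.1) := by
  unfold get_acquired_skills
  have : ∀ (l : List (Int × Char)) (rs : List Int),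
      l.foldl (fun rs p => if p.2 == '1' then pvInnerA rs p.1 pskills else rs) rs =
        rs ++ (l.filter (fun p => p.2 == '1' && pskills.any (fun q => q.2 == p.1))).map (·.1) := by
    intro l
    induction l with
    | nil => simp
    | cons p rest ih =>
      intro rs
      rw [List.foldl_cons, ih]
      by_cases h1 : p.2 = '1'
      · rw [if_pos (by simp [h1]), pvInnerA_eq]
        by_cases h2 : pskills.any (fun q => q.2 == p.1)
        · simp [h1, h2]
        · simp [h1, h2]
      · simp [h1]
  simpa using this (PySem.List.enumerate s.toList) []

theorem portA_pairwise (pskills : List (Int × Int)) (s : String) :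
    (get_acquired_skills pskills s).Pairwise (· < ·) := by
  rw [portA_eq]
  exact List.Pairwise.map _ (fun a b h => h)
    ((PySem.List.pairwise_lt_enumerate s.toList 0).filter _)

theorem mem_portA (pskills : List (Int × Int)) (s : String) (x : Int) :
    x ∈ get_acquired_skills pskills s ↔
      (∃ (k : Nat) (h : k < s.toList.length), x = (k : Int) ∧ s.toList[k] = '1') ∧
        ∃ q ∈ pskills, q.2 = x := by
  rw [portA_eq]
  simp only [List.mem_map, List.mem_filter, PySem.List.mem_enumerate_iff]
  constructor
  · rintro ⟨⟨i, c⟩, ⟨⟨k, hk, hkeq⟩, hcond⟩, rfl⟩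
    simp only [Prod.mk.injEq] at hkeq
    obtain ⟨hi, hc⟩ := hkeq
    simp only [Bool.and_eq_true, beq_iff_eq, List.any_eq_true] at hcond
    obtain ⟨q, hq, hq2⟩ := hcond.2
    exact ⟨⟨k, hk, by omega, by rw [← hc]; exact hcond.1⟩, q, hq, hq2⟩
  · rintro ⟨⟨k, hk, rfl, hc⟩, q, hq, hqx⟩
    refine ⟨((k : Int), s.toList[k]), ⟨⟨k, hk, by simp⟩, ?_⟩, rfl⟩
    simp only [Bool.and_eq_true, beq_iff_eq, List.any_eq_true]
    exact ⟨hc, ⟨q, hq, by simpa using hqx⟩⟩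

theorem mem_portB_set (pskills : List (Int × Int)) (s : String) (x : Int) :
    x ∈ PySem.Set.ofList ((pskills.filter (fun p =>
      decide (0 ≤ p.2 ∧ p.2 < (s.toList.length : Int)) &&
      (PySem.List.pyGet? s.toList p.2 == some '1'))).map (·.2)) ↔
      (∃ (k : Nat) (h : k < s.toList.length), x = (k : Int) ∧ s.toList[k] = '1') ∧
        ∃ q ∈ pskills, q.2 = x := by
  rw [PySem.Set.mem_ofList]
  simp only [List.mem_map, List.mem_filter, Bool.and_eq_true, decide_eq_true_eq, beq_iff_eq]
  constructor
  · rintro ⟨q, ⟨hq, ⟨h0, hlt⟩, hget⟩, rfl⟩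
    have hk : q.2.toNat < s.toList.length := by omega
    refine ⟨⟨q.2.toNat, hk, by omega, ?_⟩, q, hq, rfl⟩
    rw [PySem.List.pyGet?_of_nonneg s.toList h0, List.getElem?_eq_getElem hk] at hget
    simpa using hget
  · rintro ⟨⟨k, hk, rfl, hc⟩, q, hq, hqx⟩
    refine ⟨q, ⟨hq, ⟨by omega, by omega⟩, ?_⟩, hqx⟩
    rw [PySem.List.pyGet?_of_nonneg s.toList (by omega)]
    have hq2 : q.2.toNat = k := by omega
    rw [hq2, List.getElem?_eq_getElem hk, hc]

-- ===== VERDICT (by name: the statement is the Claim_ definition above) =====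
theorem get_acquired_skills_spec : Claim_equal_get_acquired_skills := by
  intro pskills s _
  unfold Spec_get_acquired_skills get_acquired_skills_alt
  refine (PySem.List.sorted_eq_of_perm_of_pairwise_lt _ _ (fun x => x) ?_ ?_).symm
  · refine ((List.perm_ext_iff_of_nodup (portA_pairwise pskills s).nodup
      (PySem.Set.nodup_ofList _)).2 ?_)
    intro a
    rw [mem_portA, mem_portB_set]
  · exact portA_pairwise pskills s
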